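-- pv_equiv track=rewrite | github.com/csprance/CE_Python | chunkfile/chunk_utils.py | halffloat_to_intfloat
-- ===== SOURCE A (Python) =====
-- def halffloat_to_intfloat(halffloat):
--     s = int(halffloat >> 15 & 1)
--     e = int(halffloat >> 10 & 31)
--     f = int(halffloat & 1023)
--     if e == 0:
--         if f == 0:
--             return int(s << 31)
--         while not f & 1024:
--             f = f << 1
--             e -= 1
--
--         e += 1
--         f &= -1025
--     elif e == 31:
--         if f == 0:
--             return int(s << 31 | 2139095040)
--         else:
--             return int(s << 31 | 2139095040 | f << 13)
--     e = e + 112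
--     f = f << 13
--     return int(s << 31 | e << 23 | f)
-- ===== SOURCE B (Python) =====
-- def halffloat_to_intfloat(halffloat):
--     s = halffloat >> 15 & 1
--     e = halffloat >> 10 & 31
--     f = halffloat & 1023
--     if e == 31:
--         return s << 31 | 2139095040 | f << 13
--     if e == 0:
--         if f == 0:
--             return s << 31
--         b = f.bit_length()
--         f = (f << (11 - b)) & ~1024
--         e = b - 10
--     return s << 31 | (e + 112) << 23 | f << 13
-- ===== Notes on version B (the rewrite author's own statement) =====
-- stated objective: idiomatic
-- what changed: The subnormal normalization while-loop (repeatedly doubling the mantissa and decrementing the exponent) is replaced by a closed form using f.bit_length() that shifts the mantissa into place, clears the hidden bit and sets the exponent in one step; the special cases fall through to one shared final assembly.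
import Mathlib
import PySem

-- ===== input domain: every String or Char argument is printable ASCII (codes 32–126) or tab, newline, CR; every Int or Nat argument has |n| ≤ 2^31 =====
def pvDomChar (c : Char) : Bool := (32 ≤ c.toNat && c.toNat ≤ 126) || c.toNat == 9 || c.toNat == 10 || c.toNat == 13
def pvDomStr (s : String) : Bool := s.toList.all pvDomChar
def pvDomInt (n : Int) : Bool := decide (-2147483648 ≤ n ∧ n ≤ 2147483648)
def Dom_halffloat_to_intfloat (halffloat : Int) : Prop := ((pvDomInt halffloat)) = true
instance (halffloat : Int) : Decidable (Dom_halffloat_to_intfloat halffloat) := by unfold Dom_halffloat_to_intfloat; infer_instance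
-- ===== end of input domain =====

-- B replaces A's subnormal normalization while-loop by a closed form using bit_length (more idiomatic; same cost).

-- ===== PORT A =====
-- 'while not f & 1024: f <<= 1; e -= 1'. Fuel 11 is an upper bound only: here 1 ≤ f ≤ 1023, so ≤ 10 iterations.
def aLoop : Nat → Int → Int → Int × Int
  | 0, f, e => (f, e)
  | n + 1, f, e =>
      if PySem.Int.band f 1024 = 0 then aLoop n (f <<< 1) (e - 1) else (f, e)

def halffloat_to_intfloat (halffloat : Int) : Int :=
  let s := PySem.Int.band (halffloat >>> 15) 1
  let e := PySem.Int.band (halffloat >>> 10) 31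
  let f := PySem.Int.band halffloat 1023
  if e = 0 then
    if f = 0 then s <<< 31
    else
      let p := aLoop 11 f e
      let e := p.2 + 1
      let f := PySem.Int.band p.1 (-1025)
      let e := e + 112
      let f := f <<< 13
      PySem.Int.bor (PySem.Int.bor (s <<< 31) (e <<< 23)) f
  else if e = 31 then
    if f = 0 then PySem.Int.bor (s <<< 31) 2139095040
    else PySem.Int.bor (PySem.Int.bor (s <<< 31) 2139095040) (f <<< 13)
  else
    let e := e + 112
    let f := f <<< 13
    PySem.Int.bor (PySem.Int.bor (s <<< 31) (e <<< 23)) f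

-- ===== PORT B =====
def halffloat_to_intfloat_alt (halffloat : Int) : Int :=
  let s := PySem.Int.band (halffloat >>> 15) 1
  let e := PySem.Int.band (halffloat >>> 10) 31
  let f := PySem.Int.band halffloat 1023
  if e = 31 then PySem.Int.bor (PySem.Int.bor (s <<< 31) 2139095040) (f <<< 13)
  else if e = 0 then
    if f = 0 then s <<< 31
    else
      -- b = f.bit_length(); f = (f << (11 - b)) & ~1024; e = b - 10; then the shared return
      let b := PySem.Int.bitLength f
      let f := PySem.Int.band (f <<< (11 - b)) (Int.not 1024)
      let e := (b : Int) - 10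
      PySem.Int.bor (PySem.Int.bor (s <<< 31) ((e + 112) <<< 23)) (f <<< 13)
  else PySem.Int.bor (PySem.Int.bor (s <<< 31) ((e + 112) <<< 23)) (f <<< 13)

-- ===== PRECONDITION & SPEC =====
def Spec_halffloat_to_intfloat (halffloat : Int) (out : Int) : Prop := out = halffloat_to_intfloat_alt halffloat
instance (halffloat : Int) (out : Int) : Decidable (Spec_halffloat_to_intfloat halffloat out) := by unfold Spec_halffloat_to_intfloat; infer_instance

-- ===== CLAIM (what is proved, stated in full; the proofs are below) =====
def Claim_equal_halffloat_to_intfloat : Prop := ∀ (halffloat : Int), Dom_halffloat_to_intfloat halffloat → Spec_halffloat_to_intfloat halffloat (halffloat_to_intfloat halffloat)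

-- ===== LEMMAS AND PROOFS =====

theorem band31_emod (a : Int) : PySem.Int.band a 31 = a % 32 := by
  rw [PySem.Int.band]
  by_cases h : 0 ≤ a
  · rw [if_pos h, if_pos (by norm_num : (0:Int) ≤ 31)]
    rw [show (31:Int).toNat = 2 ^ 5 - 1 from rfl, Nat.and_two_pow_sub_one_eq_mod]
    omega
  · rw [if_neg h, if_pos (by norm_num : (0:Int) ≤ 31)]
    rw [show (31:Int).toNat = 2 ^ 5 - 1 from rfl, Nat.and_comm, Nat.and_two_pow_sub_one_eq_mod]
    omega

theorem band1023_emod (a : Int) : PySem.Int.band a 1023 = a % 1024 := by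
  rw [PySem.Int.band]
  by_cases h : 0 ≤ a
  · rw [if_pos h, if_pos (by norm_num : (0:Int) ≤ 1023)]
    rw [show (1023:Int).toNat = 2 ^ 10 - 1 from rfl, Nat.and_two_pow_sub_one_eq_mod]
    omega
  · rw [if_neg h, if_pos (by norm_num : (0:Int) ≤ 1023)]
    rw [show (1023:Int).toNat = 2 ^ 10 - 1 from rfl, Nat.and_comm, Nat.and_two_pow_sub_one_eq_mod]
    omega

-- On 1 ≤ f ≤ 1023 the while-loop followed by 'e += 1; f &= -1025' equals the bit_length closed form.
set_option maxRecDepth 100000 in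
theorem subnormal_closed : ∀ x : Fin 1024, x.val ≠ 0 →
    PySem.Int.band (aLoop 11 (x.val : Int) 0).1 (-1025)
        = PySem.Int.band ((x.val : Int) <<< (11 - PySem.Int.bitLength (x.val : Int))) (Int.not 1024)
      ∧ (aLoop 11 (x.val : Int) 0).2 + 1 = ((PySem.Int.bitLength (x.val : Int) : Int)) - 10 := by
  decide

theorem subnormal_closed_int (f : Int) (hlo : 0 < f) (hhi : f < 1024) :
    PySem.Int.band (aLoop 11 f 0).1 (-1025)
        = PySem.Int.band (f <<< (11 - PySem.Int.bitLength f)) (Int.not 1024)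
      ∧ (aLoop 11 f 0).2 + 1 = ((PySem.Int.bitLength f : Int)) - 10 := by
  simpa [Int.toNat_of_nonneg hlo.le] using
    subnormal_closed ⟨f.toNat, by omega⟩ (by simp; omega)

theorem ports_agree (halffloat : Int) :
    halffloat_to_intfloat halffloat = halffloat_to_intfloat_alt halffloat := by
  have hE := band31_emod (halffloat >>> 10)
  have hF := band1023_emod halffloat
  simp only [halffloat_to_intfloat, halffloat_to_intfloat_alt]
  generalize PySem.Int.band (halffloat >>> 15) 1 = s
  generalize hge : PySem.Int.band (halffloat >>> 10) 31 = e
  generalize hgf : PySem.Int.band halffloat 1023 = f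
  rw [hge] at hE; rw [hgf] at hF
  have heb : 0 ≤ e ∧ e < 32 := by rw [hE]; omega
  have hfb : 0 ≤ f ∧ f < 1024 := by rw [hF]; omega
  by_cases h0 : e = 0
  · subst h0
    rw [if_pos rfl, if_neg (by norm_num : ¬ (0:Int) = 31), if_pos rfl]
    by_cases hf0 : f = 0
    · rw [if_pos hf0, if_pos hf0]
    · rw [if_neg hf0, if_neg hf0]
      obtain ⟨h1, h2⟩ := subnormal_closed_int f (by omega) (by omega)
      rw [h1, h2]
  · by_cases h31 : e = 31
    · subst h31
      rw [if_neg h0, if_pos rfl, if_pos rfl]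
      by_cases hf0 : f = 0
      · rw [if_pos hf0, hf0]
        simp [PySem.Int.bor_zero, show ((0:Int) <<< 13) = 0 from rfl]
      · rw [if_neg hf0]
    · rw [if_neg h0, if_neg h31, if_neg h31, if_neg h0]

-- ===== VERDICT (by name: the statement is the Claim_ definition above) =====
theorem halffloat_to_intfloat_spec : Claim_equal_halffloat_to_intfloat := by
  intro h _
  unfold Spec_halffloat_to_intfloat
  exact ports_agree h
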